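-- pv_equiv track=rewrite | github.com/TheNasaFx/Computer_vision_assignment | main.py | _parse_sources
-- ===== SOURCE A (Python) =====
-- def _parse_sources(tokens: list[str]) -> list[str]:
--     """Parse source tokens — join space-separated filenames back together.
--
--     Handles:
--       --source 0                              → ["0"]
--       --source "video.mp4"                    → ["video.mp4"]
--       --source 4K Road traffic.mp4            → ["4K Road traffic.mp4"]
--       --source 0 rtsp://cam1                  → ["0", "rtsp://cam1"]
--     """
--     # If a single token, return as-is
--     if len(tokens) == 1:
--         return tokens
--
--     # Strategy: webcam indexes (digits) and URLs (://) are standalone sources.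
--     # Everything else is part of a filename that got split by spaces.
--     sources: list[str] = []
--     buf: list[str] = []
--
--     for t in tokens:
--         is_standalone = t.isdigit() or "://" in t
--         if is_standalone:
--             if buf:
--                 sources.append(" ".join(buf))
--                 buf = []
--             sources.append(t)
--         else:
--             buf.append(t)
--
--     if buf:
--         sources.append(" ".join(buf))
--
--     return sources
-- ===== SOURCE B (Python) =====
-- def _parse_sources(tokens: list[str]) -> list[str]:
--     """Join space-split source filename tokens; digits and URLs stay standalone."""
--     def _standalone(t: str) -> bool:
--         return t.isdigit() or "://" in t
--
--     out: list[str] = []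
--     i, n = 0, len(tokens)
--     while i < n:
--         if _standalone(tokens[i]):
--             out.append(tokens[i])
--             i += 1
--         else:
--             j = i + 1
--             while j < n and not _standalone(tokens[j]):
--                 j += 1
--             out.append(" ".join(tokens[i:j]))
--             i = j
--     return out
-- ===== Notes on version B (the rewrite author's own statement) =====
-- stated objective: simpler
-- what changed: Replaces the buffer-accumulating for-loop (with a len==1 early return and a final flush) by a single run-scanning loop: each maximal run of non-standalone tokens is located with an inner index scan and joined at once, so there is no pending buffer, no flush, and no special case.
import Mathlib
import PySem

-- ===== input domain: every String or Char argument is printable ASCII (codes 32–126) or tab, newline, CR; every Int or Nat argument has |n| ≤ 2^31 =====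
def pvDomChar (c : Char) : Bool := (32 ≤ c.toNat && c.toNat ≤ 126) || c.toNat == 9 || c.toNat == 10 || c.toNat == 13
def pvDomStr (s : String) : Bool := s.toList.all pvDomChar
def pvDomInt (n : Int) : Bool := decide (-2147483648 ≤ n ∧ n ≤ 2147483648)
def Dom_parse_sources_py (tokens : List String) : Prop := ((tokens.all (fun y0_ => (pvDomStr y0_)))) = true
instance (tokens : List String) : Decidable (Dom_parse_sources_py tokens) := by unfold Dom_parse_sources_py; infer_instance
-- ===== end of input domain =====

-- B replaces A's buffer-accumulating loop (with len==1 early return and a final flush)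
-- by a run-scanning loop joining each maximal run of non-standalone tokens at once; objective: simpler.

-- ===== PORT A =====
-- t.isdigit() or "://" in t
def pvStandalone (t : String) : Bool :=
  PySem.Str.strIsdigit t || PySem.Str.isIn "://" t

def parse_sources_py (tokens : List String) : List String :=
  if tokens.length == 1 then tokens
  else
    let st := tokens.foldl
      (fun (st : List String × List String) t =>
        if pvStandalone t then
          ((if st.2.isEmpty then st.1 else st.1 ++ [PySem.Str.join " " st.2]) ++ [t], [])
        else (st.1, st.2 ++ [t]))
      ([], [])
    if st.2.isEmpty then st.1 else st.1 ++ [PySem.Str.join " " st.2]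

-- ===== PORT B =====
-- the outer while loop of Source B: a standalone token is emitted alone; otherwise the inner
-- while scan (takeWhile/dropWhile over the rest) locates the maximal non-standalone run,
-- which is joined with " " and emitted as one element
def pvAltGo : List String → List String
  | [] => []
  | t :: ts =>
    if pvStandalone t then t :: pvAltGo ts
    else PySem.Str.join " " (t :: ts.takeWhile (fun x => !pvStandalone x))
           :: pvAltGo (ts.dropWhile (fun x => !pvStandalone x))
termination_by l => l.length
decreasing_by
  · simp
  · have := List.length_dropWhile_le (p := fun x => !pvStandalone x) (l := ts)
    simp; omega

def parse_sources_py_alt (tokens : List String) : List String := pvAltGo tokens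

-- ===== PRECONDITION & SPEC =====
def Spec_parse_sources_py (tokens : List String) (out : List String) : Prop := out = parse_sources_py_alt tokens
instance (tokens : List String) (out : List String) : Decidable (Spec_parse_sources_py tokens out) := by unfold Spec_parse_sources_py; infer_instance

-- ===== CLAIM =====
def Claim_equal_parse_sources_py : Prop := ∀ (tokens : List String), Dom_parse_sources_py tokens → Spec_parse_sources_py tokens (parse_sources_py tokens)

-- ===== LEMMAS AND PROOFS =====

-- A's loop body from an arbitrary state, with the final flush applied
def pvAux (buf : List String) : List String → List String
  | [] => if buf.isEmpty then [] else [PySem.Str.join " " buf]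
  | t :: ts =>
    if pvStandalone t then
      (if buf.isEmpty then [] else [PySem.Str.join " " buf]) ++ t :: pvAux [] ts
    else pvAux (buf ++ [t]) ts

lemma pvFold_eq_aux (ts : List String) : ∀ (sources buf : List String),
    (let st := ts.foldl
      (fun (st : List String × List String) t =>
        if pvStandalone t then
          ((if st.2.isEmpty then st.1 else st.1 ++ [PySem.Str.join " " st.2]) ++ [t], [])
        else (st.1, st.2 ++ [t]))
      (sources, buf);
     if st.2.isEmpty then st.1 else st.1 ++ [PySem.Str.join " " st.2])
    = sources ++ pvAux buf ts := by
  induction ts with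
  | nil => intro sources buf; by_cases h : buf = [] <;> simp [pvAux, h]
  | cons t ts ih =>
    intro sources buf
    by_cases hs : pvStandalone t
    · by_cases hb : buf = []
      · simpa [pvAux, hs, hb, List.append_assoc] using ih (sources ++ [t]) []
      · simpa [pvAux, hs, hb, List.append_assoc] using
          ih (sources ++ [PySem.Str.join " " buf] ++ [t]) []
    · simpa [pvAux, hs] using ih sources (buf ++ [t])

lemma pvAux_eq_altGo (ts : List String) :
    pvAux [] ts = pvAltGo ts ∧
    ∀ buf, buf ≠ [] →
      pvAux buf ts
        = PySem.Str.join " " (buf ++ ts.takeWhile (fun x => !pvStandalone x))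
            :: pvAltGo (ts.dropWhile (fun x => !pvStandalone x)) := by
  induction ts with
  | nil =>
    refine ⟨by simp [pvAux, pvAltGo], ?_⟩
    intro buf hb; simp [pvAux, pvAltGo, hb]
  | cons t ts ih =>
    by_cases hs : pvStandalone t
    · refine ⟨by simp [pvAux, pvAltGo, hs, ih.1], ?_⟩
      intro buf hb
      simp [pvAux, pvAltGo, hs, hb, List.takeWhile, List.dropWhile, ih.1]
    · have h2 := ih.2
      refine ⟨?_, ?_⟩
      · have := h2 [t] (by simp)
        simpa [pvAux, pvAltGo, hs, List.takeWhile, List.dropWhile] using this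
      · intro buf hb
        have := h2 (buf ++ [t]) (by simp)
        simpa [pvAux, pvAltGo, hs, List.takeWhile, List.dropWhile,
               List.append_assoc] using this

lemma pvJoin_singleton (t : String) : PySem.Str.join " " [t] = t := by
  simp [PySem.Str.join, PySem.Chars.join_singleton]

lemma pvAltGo_singleton (t : String) : pvAltGo [t] = [t] := by
  by_cases hs : pvStandalone t <;>
    simp [pvAltGo, hs, List.takeWhile, List.dropWhile, pvJoin_singleton]

-- ===== VERDICT =====
theorem parse_sources_py_spec : Claim_equal_parse_sources_py := by
  intro tokens _
  unfold Spec_parse_sources_py parse_sources_py parse_sources_py_alt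
  by_cases h1 : tokens.length == 1
  · match tokens, h1 with
    | [t], _ => simp [pvAltGo_singleton]
  · simpa [h1] using
      (pvFold_eq_aux tokens [] []).trans (by simp [(pvAux_eq_altGo tokens).1])
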